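-- pv_equiv track=rewrite | github.com/daniel-reich/turbo-robot | 82AvsFFQprj43XCDS_21.py | no_strangers
-- ===== SOURCE A (Python) =====
-- def no_strangers(txt):
--   txt2 = ""
--
--   for letter in txt:
--     if letter.isalpha() or letter == " " or letter == "'":
--       txt2 += letter.lower()
--
--   lst = txt2.split()
--
--   friends = []
--   acquaintances = []
--   strangers = {}
--   result = []
--
--   for l in lst:
--     if not l in strangers.keys():
--       strangers[l] = 1
--     else:
--       strangers[l] = strangers[l] + 1
--       if strangers[l] == 3:
--         acquaintances.append(l)
--       elif strangers[l] == 5: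
--         acquaintances.pop(acquaintances.index(l))
--         friends.append(l)
--
--   result.append(acquaintances)
--   result.append(friends)
--   return result
-- ===== SOURCE B (Python) =====
-- def no_strangers(txt):
--   cleaned = "".join(c.lower() for c in txt
--                     if c.isalpha() or c == " " or c == "'")
--   words = cleaned.split()
--
--   total = {}
--   for w in words:
--     total[w] = total.get(w, 0) + 1
--
--   acquaintances = []
--   friends = []
--   running = {}
--   for w in words:
--     n = running.get(w, 0) + 1
--     running[w] = n
--     if n == 3 and total[w] < 5:
--       acquaintances.append(w)
--     elif n == 5:
--       friends.append(w)
--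
--   return [acquaintances, friends]
-- ===== Notes on version B (the rewrite author's own statement) =====
-- stated objective: alternative
-- what changed: Precomputes final word counts first, then a single append-only pass places each word at its 3rd occurrence (only if its final count is < 5) or 5th occurrence, eliminating A's acquaintances.index/pop mutation.
import Mathlib
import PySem

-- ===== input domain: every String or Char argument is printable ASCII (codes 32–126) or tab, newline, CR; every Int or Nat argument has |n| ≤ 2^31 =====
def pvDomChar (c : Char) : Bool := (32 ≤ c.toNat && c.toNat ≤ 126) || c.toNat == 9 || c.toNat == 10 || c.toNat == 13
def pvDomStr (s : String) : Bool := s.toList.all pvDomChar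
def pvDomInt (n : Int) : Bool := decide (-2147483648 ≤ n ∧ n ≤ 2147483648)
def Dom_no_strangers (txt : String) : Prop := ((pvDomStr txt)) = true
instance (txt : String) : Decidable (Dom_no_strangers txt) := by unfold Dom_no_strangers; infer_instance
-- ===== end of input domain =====

-- B replaces A's online acquaintances.index/pop mutation by precomputing the final word counts
-- and doing one append-only placement pass (alternative decomposition, same cost class).

-- ===== PORT A =====
-- loop state = (friends, acquaintances, strangers)
def nsStepA (st : List String × List String × PySem.Dict String Int) (l : String) :
    List String × List String × PySem.Dict String Int :=
  let friends := st.1; let acq := st.2.1; let strangers := st.2.2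
  if !(strangers.contains l) then
    (friends, acq, strangers.insert l 1)
  else
    let n := strangers.getD l 0 + 1
    let strangers' := strangers.insert l n
    if n == 3 then (friends, acq ++ [l], strangers')
    else if n == 5 then
      match PySem.List.index? acq l with
      | some i =>
        match PySem.List.pop? acq (i : Int) with
        | some r => (friends ++ [l], r.2, strangers')
        | none => (friends, acq, strangers')   -- unreachable (Python would raise IndexError)
      | none => (friends, acq, strangers')     -- unreachable (Python would raise ValueError)
    else (friends, acq, strangers')

def no_strangers (txt : String) : List (List String) :=
  let txt2 := txt.toList.foldl (fun acc c =>
    if PySem.Chars.isalpha c || c == ' ' || c == '\'' then acc ++ [PySem.Chars.lowerChar c]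
    else acc) []
  let lst := (PySem.Chars.split₀ txt2).map String.mk
  let st := lst.foldl nsStepA ([], [], PySem.Dict.empty)
  [st.2.1, st.1]

-- ===== PORT B =====
-- loop state = (acquaintances, friends, running)
def nsStepB (total : PySem.Dict String Int)
    (st : List String × List String × PySem.Dict String Int) (w : String) :
    List String × List String × PySem.Dict String Int :=
  let acq := st.1; let friends := st.2.1; let run := st.2.2
  let n := run.getD w 0 + 1
  let run' := run.insert w n
  if n == 3 && total.getD w 0 < 5 then (acq ++ [w], friends, run')
  else if n == 5 then (acq, friends ++ [w], run')
  else (acq, friends, run')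

def no_strangers_alt (txt : String) : List (List String) :=
  let cleaned := txt.toList.filterMap (fun c =>
    if PySem.Chars.isalpha c || c == ' ' || c == '\'' then some (PySem.Chars.lowerChar c)
    else none)
  let words := (PySem.Chars.split₀ cleaned).map String.mk
  let total := words.foldl (fun d w => d.insert w (d.getD w 0 + 1)) PySem.Dict.empty
  let st := words.foldl (nsStepB total) ([], [], PySem.Dict.empty)
  [st.1, st.2.1]

-- ===== PRECONDITION & SPEC =====
def Spec_no_strangers (txt : String) (out : List (List String)) : Prop := out = no_strangers_alt txt
instance (txt : String) (out : List (List String)) : Decidable (Spec_no_strangers txt out) := by unfold Spec_no_strangers; infer_instance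

-- ===== CLAIM (what is proved, stated in full; the proofs are below) =====
def Claim_equal_no_strangers : Prop := ∀ (txt : String), Dom_no_strangers txt → Spec_no_strangers txt (no_strangers txt)

-- ===== LEMMAS AND PROOFS =====

-- reference loop: t = words at their 3rd occurrence (in order), fr = words at their 5th, d = counts
def nsRef (st : List String × List String × PySem.Dict String Int) (w : String) :
    List String × List String × PySem.Dict String Int :=
  let t := st.1; let fr := st.2.1; let d := st.2.2
  let n := d.getD w 0 + 1
  (if n == 3 then t ++ [w] else t, if n == 5 then fr ++ [w] else fr, d.insert w n)

-- the counts component of the reference fold is the plain counting fold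
theorem nsRef_counts (rest : List String) (t fr : List String) (d : PySem.Dict String Int) :
    (rest.foldl nsRef (t, fr, d)).2.2
      = rest.foldl (fun d w => d.insert w (d.getD w 0 + 1)) d := by
  induction rest generalizing t fr d with
  | nil => rfl
  | cons w rest ih => simp [List.foldl_cons, nsRef, ih]

-- B's fold is the reference fold with acquaintances filtered by the (fixed) total table
theorem foldB_eq_ref (total : PySem.Dict String Int) (rest : List String) :
    ∀ (t fr : List String) (d : PySem.Dict String Int),
    rest.foldl (nsStepB total) (t.filter (fun w => decide (total.getD w 0 < 5)), fr, d)
      = ((rest.foldl nsRef (t, fr, d)).1.filter (fun w => decide (total.getD w 0 < 5)),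
         (rest.foldl nsRef (t, fr, d)).2.1, (rest.foldl nsRef (t, fr, d)).2.2) := by
  induction rest with
  | nil => intro t fr d; rfl
  | cons w rest ih =>
    intro t fr d
    simp only [List.foldl_cons]
    have hstep : nsStepB total (t.filter (fun w => decide (total.getD w 0 < 5)), fr, d) w
        = ((nsRef (t, fr, d) w).1.filter (fun w => decide (total.getD w 0 < 5)),
           (nsRef (t, fr, d) w).2.1, (nsRef (t, fr, d) w).2.2) := by
      simp only [nsStepB, nsRef]
      by_cases h3 : d.getD w 0 + 1 = 3
      · by_cases h5 : total.getD w 0 < 5 <;>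
          simp [h3, h5, List.filter_append]
      · by_cases h5 : d.getD w 0 + 1 = 5 <;> simp [h3, h5]
    rw [hstep]
    simpa using ih (nsRef (t, fr, d) w).1 (nsRef (t, fr, d) w).2.1 (nsRef (t, fr, d) w).2.2

-- index then pop of a member returns it with the first occurrence erased
theorem index_pop_w (xs : List String) (w : String) (hm : w ∈ xs) :
    ∃ i : Nat, PySem.List.index? xs w = some i ∧
      PySem.List.pop? xs (i : Int) = some (w, xs.erase w) := by
  obtain ⟨i, hi⟩ := Option.isSome_iff_exists.mp ((PySem.List.index?_isSome_iff xs w).mpr hm)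
  obtain ⟨pre, suf, hxs, hlen, hpre⟩ := (PySem.List.index?_eq_some_iff xs w i).mp hi
  refine ⟨i, hi, ?_⟩
  have hlt : i < xs.length := by subst hxs; simp [← hlen]
  rw [PySem.List.pop?_natCast xs i hlt]
  obtain ⟨h, hget, -⟩ := PySem.List.getElem_of_index?_eq_some hi
  subst hxs
  rw [hget, ← hlen, List.eraseIdx_append_of_length_le (le_refl pre.length),
      List.erase_append_right _ hpre]
  simp

-- flipping the filter bit of one element of a Nodup list erases its (only) occurrence
theorem filter_flip_erase {t : List String} {p p' : String → Bool} {w : String}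
    (hnd : t.Nodup) (hw : p w = true) (hw' : p' w = false)
    (hagree : ∀ v ∈ t, v ≠ w → p v = p' v) :
    t.filter p' = (t.filter p).erase w := by
  induction t with
  | nil => rfl
  | cons a t ih =>
    have hnd' := (List.nodup_cons.mp hnd).2
    have ih' := ih hnd' (fun v hv hvw => hagree v (List.mem_cons_of_mem _ hv) hvw)
    by_cases haw : a = w
    · subst haw
      have hnotin : a ∉ t := (List.nodup_cons.mp hnd).1
      have : t.filter p' = t.filter p := by
        apply List.filter_congr
        intro v hv
        exact (hagree v (List.mem_cons_of_mem _ hv) (fun h => hnotin (h ▸ hv))).symm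
      simp [hw, hw', this]
    · have ha' : p a = p' a := hagree a (List.mem_cons_self) haw
      by_cases hpa : p a = true
      · have hpa' : p' a = true := ha' ▸ hpa
        simp [hpa, hpa', ih', haw]
      · have hpa' : p' a = false := by rw [← ha']; simpa using hpa
        simp [Bool.eq_false_iff.mpr (by simp [hpa] : ¬ p a = true), hpa', ih']

-- one step of A, on a state in canonical form, is one reference step (still canonical)
theorem stepA_eq (t fr : List String) (d : PySem.Dict String Int) (w : String)
    (hnd : t.Nodup) (hinv : ∀ v, v ∈ t ↔ 3 ≤ d.getD v 0) :
    nsStepA (fr, t.filter (fun v => decide (d.getD v 0 ≤ 4)), d) w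
      = ((nsRef (t, fr, d) w).2.1,
         (nsRef (t, fr, d) w).1.filter
           (fun v => decide ((d.insert w (d.getD w 0 + 1)).getD v 0 ≤ 4)),
         (nsRef (t, fr, d) w).2.2) := by
  have hne : ∀ v ∈ t, v ≠ w →
      (decide (d.getD v 0 ≤ 4)) = (decide ((d.insert w (d.getD w 0 + 1)).getD v 0 ≤ 4)) := by
    intro v _ hvw
    rw [PySem.Dict.getD_insert]
    simp [hvw]
  by_cases hc : d.contains w = true
  · by_cases h3 : d.getD w 0 + 1 = 3
    · have hwnott : w ∉ t := by rw [hinv w]; omega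
      have : t.filter (fun v => decide (d.getD v 0 ≤ 4))
          = t.filter (fun v => decide ((d.insert w (d.getD w 0 + 1)).getD v 0 ≤ 4)) :=
        List.filter_congr (fun v hv => hne v hv (fun h => hwnott (h ▸ hv)))
      simp only [nsStepA, nsRef, hc, h3, Bool.not_true]
      simp [h3, List.filter_append, PySem.Dict.getD_insert_self, this]
    · by_cases h5 : d.getD w 0 + 1 = 5
      · have hc4 : d.getD w 0 = 4 := by omega
        have hwf : w ∈ t.filter (fun v => decide (d.getD v 0 ≤ 4)) := by
          simp [List.mem_filter, (hinv w).mpr (by omega), hc4]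
        obtain ⟨i, hi, hpop⟩ := index_pop_w _ w hwf
        have herase : t.filter (fun v => decide ((d.insert w (d.getD w 0 + 1)).getD v 0 ≤ 4))
            = (t.filter (fun v => decide (d.getD v 0 ≤ 4))).erase w := by
          apply filter_flip_erase hnd (by simp [hc4])
            (by simp [PySem.Dict.getD_insert_self, h5])
          intro v hv hvw; exact hne v hv hvw
        rw [h5] at herase
        simp only [nsStepA, nsRef, hc, h5, Bool.not_true, hi, hpop]
        simp [herase]
      · have : t.filter (fun v => decide (d.getD v 0 ≤ 4))
            = t.filter (fun v => decide ((d.insert w (d.getD w 0 + 1)).getD v 0 ≤ 4)) := by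
          apply List.filter_congr
          intro v hv
          by_cases hvw : v = w
          · subst hvw
            have h3le : 3 ≤ d.getD v 0 := (hinv v).mp hv
            rw [PySem.Dict.getD_insert_self]
            exact decide_eq_decide.mpr (by omega)
          · exact hne v hv hvw
        simp only [nsStepA, nsRef, hc, Bool.not_true]
        simp [h3, h5, this]
  · have h0 : d.getD w 0 = 0 := PySem.Dict.getD_of_not_contains d 0 (by simpa using hc)
    have : t.filter (fun v => decide (d.getD v 0 ≤ 4))
        = t.filter (fun v => decide ((d.insert w (d.getD w 0 + 1)).getD v 0 ≤ 4)) :=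
      List.filter_congr (fun v hv => hne v hv
        (fun h => by rw [hinv v, h, h0] at hv; omega))
    have h1 : d.getD w 0 + 1 = 1 := by omega
    rw [h1] at this
    simp only [nsStepA, nsRef, hc, h0]
    simp [this]

-- one reference step preserves the canonical-state invariants
theorem ref_inv (t fr : List String) (d : PySem.Dict String Int) (w : String)
    (hnd : t.Nodup) (hinv : ∀ v, v ∈ t ↔ 3 ≤ d.getD v 0) :
    (nsRef (t, fr, d) w).1.Nodup ∧
      (∀ v, v ∈ (nsRef (t, fr, d) w).1 ↔ 3 ≤ (nsRef (t, fr, d) w).2.2.getD v 0) := by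
  by_cases h3 : d.getD w 0 + 1 = 3
  · have hwnott : w ∉ t := by rw [hinv w]; omega
    refine ⟨?_, ?_⟩
    · simp only [nsRef, beq_iff_eq, h3, if_true]
      simp [List.nodup_append, hnd]
      exact fun a ha haw => hwnott (haw ▸ ha)
    · intro v
      by_cases hvw : v = w
      · subst hvw; simp [nsRef, h3, PySem.Dict.getD_insert_self]
      · simp only [nsRef, beq_iff_eq, h3, if_true]
        rw [PySem.Dict.getD_insert]
        simp [hvw, hinv v]
  · refine ⟨by simp only [nsRef, beq_iff_eq, if_neg h3]; exact hnd, ?_⟩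
    intro v
    by_cases hvw : v = w
    · subst hvw
      simp only [nsRef, beq_iff_eq, if_neg h3]
      rw [PySem.Dict.getD_insert_self]
      have := hinv v
      constructor
      · intro hv; have := this.mp hv; omega
      · intro hv; exact this.mpr (by omega)
    · simp only [nsRef, beq_iff_eq, if_neg h3]
      rw [PySem.Dict.getD_insert]
      simp [hvw, hinv v]

-- A's fold is the reference fold with acquaintances filtered by the final counts
theorem foldA_eq_ref (rest : List String) :
    ∀ (t fr : List String) (d : PySem.Dict String Int),
    t.Nodup → (∀ v, v ∈ t ↔ 3 ≤ d.getD v 0) →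
    rest.foldl nsStepA (fr, t.filter (fun v => decide (d.getD v 0 ≤ 4)), d)
      = ((rest.foldl nsRef (t, fr, d)).2.1,
         (rest.foldl nsRef (t, fr, d)).1.filter
           (fun v => decide ((rest.foldl nsRef (t, fr, d)).2.2.getD v 0 ≤ 4)),
         (rest.foldl nsRef (t, fr, d)).2.2) := by
  induction rest with
  | nil => intro t fr d _ _; rfl
  | cons w rest ih =>
    intro t fr d hnd hinv
    simp only [List.foldl_cons]
    rw [stepA_eq t fr d w hnd hinv]
    obtain ⟨hnd', hinv'⟩ := ref_inv t fr d w hnd hinv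
    have := ih (nsRef (t, fr, d) w).1 (nsRef (t, fr, d) w).2.1 (nsRef (t, fr, d) w).2.2 hnd' hinv'
    simpa [nsRef] using this

-- a filterMap with an if-some-else-none body is map-after-filter
theorem filterMap_if_eq_map_filter (p : Char → Bool) (f : Char → Char) (l : List Char) :
    l.filterMap (fun c => if p c then some (f c) else none) = (l.filter p).map f := by
  induction l with
  | nil => rfl
  | cons c l ih => by_cases h : p c <;> simp [h, ih]

-- the two cleaned character lists coincide
theorem cleaned_eq (cs : List Char) :
    cs.foldl (fun acc c =>
        if PySem.Chars.isalpha c || c == ' ' || c == '\'' then acc ++ [PySem.Chars.lowerChar c]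
        else acc) []
      = cs.filterMap (fun c =>
        if PySem.Chars.isalpha c || c == ' ' || c == '\'' then some (PySem.Chars.lowerChar c)
        else none) := by
  rw [PySem.List.foldl_append_if, filterMap_if_eq_map_filter]
  simp

-- ===== VERDICT (by name: the statement is the Claim_ definition above) =====
theorem no_strangers_spec : Claim_equal_no_strangers := by
  intro txt _
  unfold Spec_no_strangers
  simp only [no_strangers, no_strangers_alt]
  rw [cleaned_eq]
  set words := (PySem.Chars.split₀ (txt.toList.filterMap (fun c =>
    if PySem.Chars.isalpha c || c == ' ' || c == '\'' then some (PySem.Chars.lowerChar c)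
    else none))).map String.mk with hwords
  have hA := foldA_eq_ref words [] [] PySem.Dict.empty List.nodup_nil
    (by intro v; simp [PySem.Dict.getD, PySem.Dict.get?, PySem.Dict.empty])
  have hB := foldB_eq_ref (words.foldl (fun d w => d.insert w (d.getD w 0 + 1)) PySem.Dict.empty)
    words [] [] PySem.Dict.empty
  simp only [List.filter_nil] at hA hB
  rw [hA, hB]
  have hcnt := nsRef_counts words [] [] PySem.Dict.empty
  simp only [hcnt]
  congr 1
  apply List.filter_congr
  intro v _
  exact decide_eq_decide.mpr (by omega)
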